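-- pv_equiv track=rewrite | github.com/vchunduru93/Databases_finalproject | Course Evaluations/parser.py | splitCourseEvals
-- ===== SOURCE A (Python) =====
-- def splitCourseEvals(text2):
-- 	# Pass 3: split each course eval up
--
-- 	evals = []
-- 	buff = ''
--
-- 	for line in text2:
-- 		if line[0:3] == 'AS.' or line[0:3] == 'EN.':
-- 			evals.append(buff)
-- 			buff = ''
-- 		buff += line
-- 	evals.append(buff)
-- 	# remove the first element which is empty
-- 	evals.pop(0)
--
-- 	return evals
-- ===== SOURCE B (Python) =====
-- def splitCourseEvals(text2):
-- 	# Different decomposition: find the span of lines up to each next boundary line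
-- 	# and join each span into one chunk; everything before the first boundary is dropped.
-- 	def is_boundary(line):
-- 		return line[0:3] == 'AS.' or line[0:3] == 'EN.'
--
-- 	lines = list(text2)
-- 	n = len(lines)
-- 	i = 0
-- 	# skip everything before the first boundary line
-- 	while i < n and not is_boundary(lines[i]):
-- 		i += 1
-- 	evals = []
-- 	while i < n:
-- 		j = i + 1
-- 		while j < n and not is_boundary(lines[j]):
-- 			j += 1
-- 		evals.append(''.join(lines[i:j]))
-- 		i = j
-- 	return evals
-- ===== Notes on version B (the rewrite author's own statement) =====
-- stated objective: alternative
-- what changed: Replaces A's single fold threading a buffer plus trailing append/pop(0) with a span-based decomposition: drop the prefix before the first boundary line, then repeatedly emit one chunk per boundary by joining the boundary line with its following run of non-boundary lines.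
import Mathlib
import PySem

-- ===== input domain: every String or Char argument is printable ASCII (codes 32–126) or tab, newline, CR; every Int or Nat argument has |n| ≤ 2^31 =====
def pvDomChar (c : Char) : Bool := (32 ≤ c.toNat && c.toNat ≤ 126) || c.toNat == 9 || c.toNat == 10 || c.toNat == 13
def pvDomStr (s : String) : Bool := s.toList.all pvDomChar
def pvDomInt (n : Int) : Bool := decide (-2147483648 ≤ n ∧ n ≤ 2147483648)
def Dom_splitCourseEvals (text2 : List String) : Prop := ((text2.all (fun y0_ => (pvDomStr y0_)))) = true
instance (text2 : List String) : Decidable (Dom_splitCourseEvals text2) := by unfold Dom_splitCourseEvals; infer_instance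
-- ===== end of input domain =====

-- B replaces A's buffer-threading fold (+ trailing append/pop(0)) with a span-based
-- decomposition: drop the prefix before the first boundary line, then emit one chunk per
-- boundary line joined with its following run of non-boundary lines (objective: alternative).

-- ===== PORT A =====
def splitCourseEvals (text2 : List String) : List String :=
  let st := text2.foldl
    (fun (s : List String × String) line =>
      if PySem.Str.slice line (some 0) (some 3) == "AS."
         || PySem.Str.slice line (some 0) (some 3) == "EN." then
        (s.1 ++ [s.2], "" ++ line)        -- evals.append(buff); buff = ''; buff += line
      else
        (s.1, s.2 ++ line))               -- buff += line
    ([], "")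
  -- evals.append(buff); evals.pop(0): the list was just appended to, so it is
  -- nonempty and pop(0) never raises: it is exactly .tail
  (st.1 ++ [st.2]).tail

-- ===== PORT B =====
def pvBoundary (line : String) : Bool :=
  PySem.Str.slice line (some 0) (some 3) == "AS."
    || PySem.Str.slice line (some 0) (some 3) == "EN."

-- the outer while-loop of Source B: one chunk per boundary line, joining its span of lines
-- (the index scan i..j over the list is the take/drop of the run of non-boundary lines)
def pvChunks : List String → List String
  | [] => []
  | h :: t =>
      PySem.Str.join "" (h :: t.takeWhile (fun l => !pvBoundary l)) ::
        pvChunks (t.dropWhile (fun l => !pvBoundary l))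
  termination_by l => l.length
  decreasing_by
    have := List.length_dropWhile_le (fun l => !pvBoundary l) t
    simp only [List.length_cons]
    omega

def splitCourseEvals_alt (text2 : List String) : List String :=
  pvChunks (text2.dropWhile (fun l => !pvBoundary l))

-- ===== PRECONDITION & SPEC =====
def Spec_splitCourseEvals (text2 : List String) (out : List String) : Prop := out = splitCourseEvals_alt text2
instance (text2 : List String) (out : List String) : Decidable (Spec_splitCourseEvals text2 out) := by unfold Spec_splitCourseEvals; infer_instance

-- ===== CLAIM (what is proved, stated in full; the proofs are below) =====
def Claim_equal_splitCourseEvals : Prop := ∀ (text2 : List String), Dom_splitCourseEvals text2 → Spec_splitCourseEvals text2 (splitCourseEvals text2)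

-- ===== LEMMAS AND PROOFS =====

-- A's fold result, generalized over the starting buffer: the chunk list it will produce
def pvChunksFrom (buff : String) : List String → List String
  | [] => [buff]
  | h :: t => if pvBoundary h then buff :: pvChunksFrom h t else pvChunksFrom (buff ++ h) t

theorem pv_join_nil : PySem.Str.join "" ([] : List String) = "" := rfl

theorem pv_join_cons (a : String) (l : List String) :
    PySem.Str.join "" (a :: l) = a ++ PySem.Str.join "" l := by
  cases l <;>
    simp [PySem.Str.join, PySem.Chars.join_cons_cons, PySem.Chars.join_singleton,
      PySem.Chars.join_nil]

theorem pvChunks_nil : pvChunks [] = [] := by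
  rw [pvChunks]

theorem pvChunks_cons (h : String) (t : List String) :
    pvChunks (h :: t) =
      (h ++ PySem.Str.join "" (t.takeWhile (fun l => !pvBoundary l))) ::
        pvChunks (t.dropWhile (fun l => !pvBoundary l)) := by
  rw [pvChunks, pv_join_cons]

theorem pv_fold_invariant (l : List String) (evals : List String) (buff : String) :
    (l.foldl
      (fun (s : List String × String) line =>
        if pvBoundary line then (s.1 ++ [s.2], "" ++ line) else (s.1, s.2 ++ line))
      (evals, buff)).1 ++
      [(l.foldl
        (fun (s : List String × String) line =>
          if pvBoundary line then (s.1 ++ [s.2], "" ++ line) else (s.1, s.2 ++ line))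
        (evals, buff)).2] = evals ++ pvChunksFrom buff l := by
  induction l generalizing evals buff with
  | nil => simp [pvChunksFrom]
  | cons h t ih =>
    rw [List.foldl_cons]
    by_cases hb : pvBoundary h
    · rw [if_pos hb, ih]
      simp [pvChunksFrom, hb, String.empty_append]
    · rw [if_neg hb, ih]
      simp [pvChunksFrom, hb]

theorem pv_chunksFrom_eq (l : List String) (buff : String) :
    pvChunksFrom buff l =
      (buff ++ PySem.Str.join "" (l.takeWhile (fun x => !pvBoundary x))) ::
        pvChunks (l.dropWhile (fun x => !pvBoundary x)) := by
  induction l generalizing buff with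
  | nil => simp [pvChunksFrom, pv_join_nil, pvChunks_nil]
  | cons h t ih =>
    by_cases hb : pvBoundary h
    · simp [pvChunksFrom, hb, pvChunks_cons, pv_join_nil, ih]
    · simp [pvChunksFrom, hb, ih, pv_join_cons, String.append_assoc]

-- ===== VERDICT (by name: the statement is the Claim_ definition above) =====
theorem splitCourseEvals_spec : Claim_equal_splitCourseEvals := by
  intro text2 _
  show ((text2.foldl
      (fun (s : List String × String) line =>
        if pvBoundary line then (s.1 ++ [s.2], "" ++ line) else (s.1, s.2 ++ line))
      ([], "")).1 ++
    [(text2.foldl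
      (fun (s : List String × String) line =>
        if pvBoundary line then (s.1 ++ [s.2], "" ++ line) else (s.1, s.2 ++ line))
      ([], "")).2]).tail = splitCourseEvals_alt text2
  rw [pv_fold_invariant, List.nil_append, pv_chunksFrom_eq, List.tail_cons]
  rfl
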